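-- pv_equiv track=rewrite | github.com/YewLabs/2021-hunt | hunt/special_puzzles/make_your_own_wordsearch/check.py | check
-- ===== SOURCE A (Python) =====
-- DIRECTIONS = [(0, 1), (1, 1), (1, 0), (1, -1), (0, -1), (-1, -1), (-1, 0), (-1, 1)]
--
-- def check(grid, words):
--     n, m = len(grid), len(grid[0])
--     for y in range(n):
--         for x in range(m):
--             for dx, dy in DIRECTIONS:
--                 nx, ny = x + dx, y + dy
--                 if nx < 0 or nx >= m or ny < 0 or ny >= n:
--                     continue
--                 if grid[ny][nx] == grid[y][x]:
--                     return False, "No two equal letters may be horizontally, vertically, or diagonally adjacent."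
--     return True, None
-- ===== SOURCE B (Python) =====
-- def check(grid, words):
--     n, m = len(grid), len(grid[0])
--     # hash index: one set of (letter, y, x) triples built in a single pass;
--     # an equal adjacent pair exists iff some cell's right/down/down-right/down-left
--     # neighbour triple with the SAME letter is in the set (bounds checks implicit).
--     cells = {(grid[y][x], y, x) for y in range(n) for x in range(m)}
--     if any((L, y, x + 1) in cells or (L, y + 1, x) in cells
--            or (L, y + 1, x + 1) in cells or (L, y + 1, x - 1) in cells
--            for (L, y, x) in cells):
--         return False, "No two equal letters may be horizontally, vertically, or diagonally adjacent."
--     return True, None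
-- ===== Notes on version B (the rewrite author's own statement) =====
-- stated objective: alternative
-- what changed: Replaces the bounds-checked scan over 8 directions per cell with a hash index: build one set of (letter, y, x) triples, then detect an equal adjacent pair by four set-membership lookups per triple (right, down, down-right, down-left), with no bounds checks at all.
import Mathlib
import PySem

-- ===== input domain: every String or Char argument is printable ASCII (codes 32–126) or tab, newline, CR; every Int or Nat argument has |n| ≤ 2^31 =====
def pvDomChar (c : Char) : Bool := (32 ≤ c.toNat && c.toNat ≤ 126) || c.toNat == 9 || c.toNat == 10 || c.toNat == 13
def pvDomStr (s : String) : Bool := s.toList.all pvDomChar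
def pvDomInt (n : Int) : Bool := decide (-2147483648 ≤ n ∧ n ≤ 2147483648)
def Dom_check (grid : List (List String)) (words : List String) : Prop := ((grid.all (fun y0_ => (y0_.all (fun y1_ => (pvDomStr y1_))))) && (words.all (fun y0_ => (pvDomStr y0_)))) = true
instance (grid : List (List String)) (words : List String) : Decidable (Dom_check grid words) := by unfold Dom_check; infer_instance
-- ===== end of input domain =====

-- B replaces A's bounds-checked 8-direction scan of the grid with a hash index: one set of
-- (letter, y, x) triples built once, then four set-membership lookups per cell (no bounds checks);
-- same return value, alternative algorithm.


-- ===== PORT A =====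
def pvDirections : List (Int × Int) := [(0, 1), (1, 1), (1, 0), (1, -1), (0, -1), (-1, -1), (-1, 0), (-1, 1)]

def pvMsg : String := "No two equal letters may be horizontally, vertically, or diagonally adjacent."

-- grid[y][x] (indices kept in range by A's guards / B's set membership; default never read under Pre_)
def pvCell (grid : List (List String)) (y x : Int) : String :=
  PySem.List.pyGetD (PySem.List.pyGetD grid y []) x ""

def check (grid : List (List String)) (words : List String) : Bool × Option String :=
  let n : Int := grid.length
  let m : Int := (PySem.List.pyGetD grid 0 []).length
  if (PySem.List.pyRange 0 n 1).any (fun y =>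
       (PySem.List.pyRange 0 m 1).any (fun x =>
         pvDirections.any (fun d =>
           let nx := x + d.1
           let ny := y + d.2
           if nx < 0 ∨ m ≤ nx ∨ ny < 0 ∨ n ≤ ny then false
           else pvCell grid ny nx == pvCell grid y x)))
  then (false, some pvMsg) else (true, none)

-- ===== PORT B =====
-- the set comprehension {(grid[y][x], y, x) for y in range(n) for x in range(m)} (pre-dedup list)
def pvCellsList (grid : List (List String)) (n m : Int) : List (String × Int × Int) :=
  (PySem.List.pyRange 0 n 1).flatMap (fun y =>
    (PySem.List.pyRange 0 m 1).map (fun x => (pvCell grid y x, y, x)))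

def check_alt (grid : List (List String)) (words : List String) : Bool × Option String :=
  let n : Int := grid.length
  let m : Int := (PySem.List.pyGetD grid 0 []).length
  let cells : PySem.Set (String × Int × Int) := PySem.Set.ofList (pvCellsList grid n m)
  -- any(...) over the set: the result is order-independent (a plain existence test)
  if cells.any (fun v =>
       PySem.Set.contains cells (v.1, v.2.1, v.2.2 + 1)
       || PySem.Set.contains cells (v.1, v.2.1 + 1, v.2.2)
       || PySem.Set.contains cells (v.1, v.2.1 + 1, v.2.2 + 1)
       || PySem.Set.contains cells (v.1, v.2.1 + 1, v.2.2 - 1))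
  then (false, some pvMsg) else (true, none)

-- ===== PRECONDITION & SPEC =====
-- Pre_ excludes empty grids and jagged grids with a row shorter than the first row: there the Python A
-- in general raises IndexError; on the few such grids where A finds an equal adjacent pair before
-- touching a short row it returns early, and those accidental early returns are excluded with the rest.
def Pre_check (grid : List (List String)) (words : List String) : Prop :=
  grid ≠ [] ∧ ∀ row ∈ grid, (grid.headD []).length ≤ row.length
instance (grid : List (List String)) (words : List String) : Decidable (Pre_check grid words) := by
  unfold Pre_check; infer_instance

def pvWitness_check : List (List String) × List String := ([["a", "b"], ["c", "d"]], ["ab"])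

def Spec_check (grid : List (List String)) (words : List String) (out : Bool × Option String) : Prop := out = check_alt grid words
instance (grid : List (List String)) (words : List String) (out : Bool × Option String) : Decidable (Spec_check grid words out) := by unfold Spec_check; infer_instance

-- ===== CLAIM (what is proved, stated in full; the proofs are below) =====
def Claim_equal_check : Prop := ∀ (grid : List (List String)) (words : List String), Dom_check grid words → Pre_check grid words → Spec_check grid words (check grid words)

-- ===== LEMMAS AND PROOFS =====

-- membership in the triple list = the coordinates are in range and the letter is the cell's letter
theorem mem_cellsList (grid : List (List String)) (n m : Int) (L : String) (a b : Int) :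
    (L, a, b) ∈ pvCellsList grid n m ↔
      (0 ≤ a ∧ a < n) ∧ (0 ≤ b ∧ b < m) ∧ L = pvCell grid a b := by
  simp only [pvCellsList, List.mem_flatMap, List.mem_map, PySem.List.mem_pyRange_one,
    Prod.mk.injEq]
  constructor
  · rintro ⟨y, hy, x, hx, hL, hy', hx'⟩; subst hy'; subst hx'; exact ⟨hy, hx, hL.symm⟩
  · rintro ⟨ha, hb, hL⟩; exact ⟨a, ha, b, hb, hL.symm, rfl, rfl⟩

-- A's triple loop finds an in-bounds equal adjacent pair iff B's set contains, for some of its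
-- triples, the right / down / down-right / down-left neighbour triple with the same letter:
-- each of A's 8 directions corresponds to one of B's 4 lookups, four of them at shifted
-- coordinates with the equality reversed.
theorem cond_iff (grid : List (List String)) (n m : Int) :
    ((PySem.List.pyRange 0 n 1).any (fun y =>
       (PySem.List.pyRange 0 m 1).any (fun x =>
         pvDirections.any (fun d =>
           let nx := x + d.1
           let ny := y + d.2
           if nx < 0 ∨ m ≤ nx ∨ ny < 0 ∨ n ≤ ny then false
           else pvCell grid ny nx == pvCell grid y x))))
    = ((PySem.Set.ofList (pvCellsList grid n m)).any (fun v =>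
       PySem.Set.contains (PySem.Set.ofList (pvCellsList grid n m)) (v.1, v.2.1, v.2.2 + 1)
       || PySem.Set.contains (PySem.Set.ofList (pvCellsList grid n m)) (v.1, v.2.1 + 1, v.2.2)
       || PySem.Set.contains (PySem.Set.ofList (pvCellsList grid n m)) (v.1, v.2.1 + 1, v.2.2 + 1)
       || PySem.Set.contains (PySem.Set.ofList (pvCellsList grid n m)) (v.1, v.2.1 + 1, v.2.2 - 1))) := by
  rw [Bool.eq_iff_iff]
  simp only [List.any_eq_true, PySem.List.mem_pyRange_one, pvDirections, List.mem_cons,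
    List.not_mem_nil, or_false, Bool.or_eq_true, PySem.Set.contains_iff, PySem.Set.mem_ofList,
    ]
  constructor
  · rintro ⟨y, hy, x, hx, d, hd, hhit⟩
    rcases hd with h|h|h|h|h|h|h|h <;> subst h <;>
      simp only [ite_eq_iff, Bool.false_eq_true, and_false, false_or, not_or, not_lt,
        not_le, beq_iff_eq] at hhit <;>
      obtain ⟨⟨hC1, hC2, hC3, hC4⟩, hhit⟩ := hhit
    -- (0,1): down -> down lookup at (y, x)
    · exact ⟨(pvCell grid y x, y, x), (mem_cellsList ..).2 ⟨⟨by omega, by omega⟩, hx, rfl⟩,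
        Or.inl (Or.inl (Or.inr ((mem_cellsList grid n m (pvCell grid y x) (y + 1) x).2
          ⟨⟨by omega, by omega⟩, hx, by simpa using hhit.symm⟩)))⟩
    -- (1,1): down-right lookup at (y, x)
    · exact ⟨(pvCell grid y x, y, x), (mem_cellsList ..).2 ⟨⟨by omega, by omega⟩, ⟨by omega, by omega⟩, rfl⟩,
        Or.inl (Or.inr ((mem_cellsList grid n m (pvCell grid y x) (y + 1) (x + 1)).2
          ⟨⟨by omega, by omega⟩, ⟨by omega, by omega⟩, by simpa using hhit.symm⟩))⟩
    -- (1,0): right lookup at (y, x)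
    · exact ⟨(pvCell grid y x, y, x), (mem_cellsList ..).2 ⟨hy, ⟨by omega, by omega⟩, rfl⟩,
        Or.inl (Or.inl (Or.inl ((mem_cellsList grid n m (pvCell grid y x) y (x + 1)).2
          ⟨hy, ⟨by omega, by omega⟩, by simpa using hhit.symm⟩)))⟩
    -- (1,-1): up-right -> down-left lookup at (y-1, x+1)
    · exact ⟨(pvCell grid (y + -1) (x + 1), y + -1, x + 1),
        (mem_cellsList ..).2 ⟨⟨by omega, by omega⟩, ⟨by omega, by omega⟩, rfl⟩,
        Or.inr ((mem_cellsList grid n m (pvCell grid (y + -1) (x + 1)) (y + -1 + 1) (x + 1 - 1)).2 ⟨⟨by omega, by omega⟩, ⟨by omega, by omega⟩, by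
          show pvCell grid (y + -1) (x + 1) = pvCell grid (y + -1 + 1) (x + 1 - 1)
          rw [show y + -1 + 1 = y from by omega, show x + 1 - 1 = x from by omega]
          simpa using hhit⟩)⟩
    -- (0,-1): up -> down lookup at (y-1, x)
    · exact ⟨(pvCell grid (y + -1) x, y + -1, x),
        (mem_cellsList ..).2 ⟨⟨by omega, by omega⟩, hx, rfl⟩,
        Or.inl (Or.inl (Or.inr ((mem_cellsList grid n m (pvCell grid (y + -1) x) (y + -1 + 1) x).2 ⟨⟨by omega, by omega⟩, hx, by
          show pvCell grid (y + -1) x = pvCell grid (y + -1 + 1) x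
          rw [show y + -1 + 1 = y from by omega]
          simpa using hhit⟩)))⟩
    -- (-1,-1): up-left -> down-right lookup at (y-1, x-1)
    · exact ⟨(pvCell grid (y + -1) (x + -1), y + -1, x + -1),
        (mem_cellsList ..).2 ⟨⟨by omega, by omega⟩, ⟨by omega, by omega⟩, rfl⟩,
        Or.inl (Or.inr ((mem_cellsList grid n m (pvCell grid (y + -1) (x + -1)) (y + -1 + 1) (x + -1 + 1)).2 ⟨⟨by omega, by omega⟩, ⟨by omega, by omega⟩, by
          show pvCell grid (y + -1) (x + -1) = pvCell grid (y + -1 + 1) (x + -1 + 1)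
          rw [show y + -1 + 1 = y from by omega, show x + -1 + 1 = x from by omega]
          simpa using hhit⟩))⟩
    -- (-1,0): left -> right lookup at (y, x-1)
    · exact ⟨(pvCell grid y (x + -1), y, x + -1),
        (mem_cellsList ..).2 ⟨hy, ⟨by omega, by omega⟩, rfl⟩,
        Or.inl (Or.inl (Or.inl ((mem_cellsList grid n m (pvCell grid y (x + -1)) y (x + -1 + 1)).2 ⟨hy, ⟨by omega, by omega⟩, by
          show pvCell grid y (x + -1) = pvCell grid y (x + -1 + 1)
          rw [show x + -1 + 1 = x from by omega]
          simpa using hhit⟩)))⟩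
    -- (-1,1): down-left lookup at (y, x)
    · exact ⟨(pvCell grid y x, y, x),
        (mem_cellsList ..).2 ⟨⟨by omega, by omega⟩, ⟨by omega, by omega⟩, rfl⟩,
        Or.inr ((mem_cellsList grid n m (pvCell grid y x) (y + 1) (x - 1)).2
          ⟨⟨by omega, by omega⟩, ⟨by omega, by omega⟩, by simpa using hhit.symm⟩)⟩
  · rintro ⟨⟨L, y, x⟩, hv, hnb⟩
    dsimp only at hnb
    obtain ⟨hy, hx, hL⟩ := (mem_cellsList ..).1 hv
    subst hL
    rcases hnb with ((h | h) | h) | h <;> obtain ⟨ha, hb, he⟩ := (mem_cellsList ..).1 h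
    · exact ⟨y, hy, x, hx, (1, 0), by simp,
        by rw [if_neg (by simp; omega)]; simpa using he.symm⟩
    · exact ⟨y, hy, x, hx, (0, 1), by simp,
        by rw [if_neg (by simp; omega)]; simpa using he.symm⟩
    · exact ⟨y, hy, x, hx, (1, 1), by simp,
        by rw [if_neg (by simp; omega)]; simpa using he.symm⟩
    · exact ⟨y, hy, x, hx, (-1, 1), by simp,
        by rw [if_neg (by simp; omega)]; simpa using he.symm⟩

theorem check_eq_alt (grid : List (List String)) (words : List String) :
    check grid words = check_alt grid words := by
  simp only [check, check_alt]
  rw [cond_iff]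

-- ===== VERDICT (by name: the statement is the Claim_ definition above) =====
theorem check_spec : Claim_equal_check := by
  intro grid words _ _
  exact check_eq_alt grid words
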